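-- pv_equiv track=rewrite | github.com/JayPatel0870/Uptime_Calculation | station_uptime.py | calculate_uptime
-- ===== SOURCE A (Python) =====
-- def calculate_uptime(station_map, charger_reports):
--     station_uptime = {}
--
--     for station_id, chargers in station_map.items():
--         total_time = 0
--         up_time = 0
--
--         intervals = []
--         for charger_id in chargers:
--             if charger_id not in charger_reports:
--                 continue
--
--             for start, end, is_up in charger_reports[charger_id]:
--                 intervals.append((start, end, is_up))
--
--         intervals.sort()
--
--         merged_intervals = []
--         for start, end, is_up in intervals:
--             if not merged_intervals:
--                 merged_intervals.append([start, end, is_up])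
--             else:
--                 if start <= merged_intervals[-1][1]:
--                     if is_up == merged_intervals[-1][2]:
--                         merged_intervals[-1][1] = max(merged_intervals[-1][1], end)
--                     else:
--                         merged_intervals.append([start, end, is_up])
--                 else:
--                     merged_intervals.append([start, end, is_up])
--
--         if merged_intervals:
--             total_time = max(merged_intervals, key=lambda x: x[1])[1] - min(merged_intervals, key=lambda x: x[0])[0]
--
--         for start, end, is_up in merged_intervals:
--             duration = end - start
--             if is_up:
--                 up_time += duration
--
--         if total_time == 0:
--             uptime_percentage = 0
--         else:
--             uptime_percentage = (up_time * 100) // total_time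
--
--         station_uptime[station_id] = uptime_percentage
--
--     return station_uptime
-- ===== SOURCE B (Python) =====
-- def _merge_dc(ints):
--     # divide-and-conquer merge: recursively merge each half, then splice the
--     # half-results by absorbing the right's leading groups into the left's last group
--     n = len(ints)
--     if n <= 1:
--         return [list(t) for t in ints]
--     left = _merge_dc(ints[:n // 2])
--     right = _merge_dc(ints[n // 2:])
--     if not left:
--         return right
--     s, e, u = left[-1]
--     i = 0
--     while i < len(right) and right[i][0] <= e and right[i][2] == u:
--         e = max(e, right[i][1])
--         i += 1
--     left[-1][1] = e
--     left.extend(right[i:])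
--     return left
--
--
-- def calculate_uptime(station_map, charger_reports):
--     result = {}
--     for station_id, chargers in station_map.items():
--         intervals = sorted(t for c in chargers for t in charger_reports.get(c, ()))
--         groups = _merge_dc(intervals)
--         if not groups:
--             result[station_id] = 0
--             continue
--         up_time = sum(e - s for s, e, u in groups if u)
--         total = max(e for _, e, _ in groups) - groups[0][0]
--         result[station_id] = (up_time * 100) // total if total else 0
--     return result
-- ===== Notes on version B (the rewrite author's own statement) =====
-- stated objective: alternative
-- what changed: B replaces A's sequential left-to-right merge loop plus three follow-up scans (max-by-end, min-by-start, up-time sum) with a divide-and-conquer merge: each half of the sorted intervals is merged recursively and the two half-results are spliced by absorbing the right half's leading groups into the left half's last group; the stats are then read off the group list with comprehensions.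
import Mathlib
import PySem

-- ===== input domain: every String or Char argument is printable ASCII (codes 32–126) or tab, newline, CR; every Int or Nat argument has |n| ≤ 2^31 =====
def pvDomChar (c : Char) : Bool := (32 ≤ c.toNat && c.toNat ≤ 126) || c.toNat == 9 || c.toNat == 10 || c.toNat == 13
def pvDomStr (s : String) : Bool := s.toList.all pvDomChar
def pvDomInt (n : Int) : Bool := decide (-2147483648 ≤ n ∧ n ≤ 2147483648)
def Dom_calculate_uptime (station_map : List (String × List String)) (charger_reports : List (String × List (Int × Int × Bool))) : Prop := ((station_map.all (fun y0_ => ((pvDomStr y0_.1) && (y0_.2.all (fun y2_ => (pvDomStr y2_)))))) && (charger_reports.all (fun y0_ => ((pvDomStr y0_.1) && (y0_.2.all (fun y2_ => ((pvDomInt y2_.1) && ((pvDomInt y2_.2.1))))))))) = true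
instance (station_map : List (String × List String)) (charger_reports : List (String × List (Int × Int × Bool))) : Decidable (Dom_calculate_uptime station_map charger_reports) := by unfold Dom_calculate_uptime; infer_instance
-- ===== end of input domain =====

-- B replaces A's sequential merge loop + three follow-up scans with a divide-and-conquer merge
-- (recursively merge each half of the sorted intervals, splice by absorbing the right half's
-- leading groups into the left half's last group) and reads the stats off the group list.


-- ===== PORT A =====
-- Python tuple sort key: lexicographic (start, end, is_up) encoded as one Int;
-- exact for |start|,|end| ≤ 2^33 (in particular on Dom_calculate_uptime, |ints| ≤ 2^31).
def pvKey (t : Int × Int × Bool) : Int :=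
  (t.1 * 17179869184 + t.2.1) * 2 + (if t.2.2 then 1 else 0)

-- one iteration of A's merge loop over merged_intervals (list kept in order; last element = merged_intervals[-1])
def pvMergeStep (m : List (Int × Int × Bool)) (t : Int × Int × Bool) : List (Int × Int × Bool) :=
  match m.getLast? with
  | none => [t]
  | some l =>
    if t.1 ≤ l.2.1 then
      if t.2.2 == l.2.2 then m.dropLast ++ [(l.1, max l.2.1 t.2.1, l.2.2)]
      else m ++ [t]
    else m ++ [t]

-- A's per-station body: collect intervals, sort, merge, then the three scans over merged_intervals
def pvStationA (charger_reports : List (String × List (Int × Int × Bool))) (chargers : List String) : Int :=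
  let intervals := chargers.foldl (fun acc cid =>
      match charger_reports.lookup cid with
      | none => acc
      | some rs => rs.foldl (fun acc2 t => acc2 ++ [t]) acc) []
  let ints := PySem.List.sorted intervals pvKey
  let merged := ints.foldl pvMergeStep []
  let total : Int := if merged.isEmpty then (0 : Int) else
      (((PySem.List.max? merged (fun x => x.2.1)).getD ((0 : Int), (0 : Int), false)).2.1
       - ((PySem.List.min? merged (fun x => x.1)).getD ((0 : Int), (0 : Int), false)).1)
  let up := merged.foldl (fun a t => if t.2.2 then a + (t.2.1 - t.1) else a) (0 : Int)
  if total = 0 then 0 else PySem.Int.floordiv (up * 100) total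

def calculate_uptime (station_map : List (String × List String)) (charger_reports : List (String × List (Int × Int × Bool))) : List (String × Int) :=
  (station_map.foldl (fun d p => d.insert p.1 (pvStationA charger_reports p.2))
    (PySem.Dict.empty : PySem.Dict String Int)).items

-- ===== PORT B =====
-- the inner while loop of _merge_dc: absorb the right half's leading groups into (e, u)
def pvAbsorb (e : Int) (u : Bool) : List (Int × Int × Bool) → Int × List (Int × Int × Bool)
  | [] => (e, [])
  | g :: R => if g.1 ≤ e ∧ g.2.2 == u then pvAbsorb (max e g.2.1) u R else (e, g :: R)

-- splice two merged half-results (Python mutates left[-1][1] and extends with right[i:])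
def pvCombine (L R : List (Int × Int × Bool)) : List (Int × Int × Bool) :=
  match L.getLast? with
  | none => R
  | some l =>
    let p := pvAbsorb l.2.1 l.2.2 R
    L.dropLast ++ (l.1, p.1, l.2.2) :: p.2

-- _merge_dc: divide-and-conquer merge of the sorted interval list
def pvDC : List (Int × Int × Bool) → List (Int × Int × Bool)
  | [] => []
  | [t] => [t]
  | t1 :: t2 :: rest =>
    pvCombine (pvDC ((t1 :: t2 :: rest).take ((t1 :: t2 :: rest).length / 2)))
              (pvDC ((t1 :: t2 :: rest).drop ((t1 :: t2 :: rest).length / 2)))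
termination_by ts => ts.length
decreasing_by
  · simp [List.length_take]; omega
  · simp [List.length_drop]; omega

-- B's per-station body: flatten with a comprehension, sort, D&C merge, comprehension stats
def pvStationB (charger_reports : List (String × List (Int × Int × Bool))) (chargers : List String) : Int :=
  let intervals := chargers.flatMap (fun c => (charger_reports.lookup c).getD [])
  let groups := pvDC (PySem.List.sorted intervals pvKey)
  match groups with
  | [] => 0
  | g0 :: gs =>
    let up := (((g0 :: gs).filter (fun g => g.2.2)).map (fun g => g.2.1 - g.1)).sum
    let total := gs.foldl (fun a g => max a g.2.1) g0.2.1 - g0.1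
    if total ≠ 0 then PySem.Int.floordiv (up * 100) total else 0

def calculate_uptime_alt (station_map : List (String × List String)) (charger_reports : List (String × List (Int × Int × Bool))) : List (String × Int) :=
  (station_map.foldl (fun d p => d.insert p.1 (pvStationB charger_reports p.2))
    (PySem.Dict.empty : PySem.Dict String Int)).items

-- ===== PRECONDITION & SPEC =====
def Spec_calculate_uptime (station_map : List (String × List String)) (charger_reports : List (String × List (Int × Int × Bool))) (out : List (String × Int)) : Prop := out = calculate_uptime_alt station_map charger_reports
instance (station_map : List (String × List String)) (charger_reports : List (String × List (Int × Int × Bool))) (out : List (String × Int)) : Decidable (Spec_calculate_uptime station_map charger_reports out) := by unfold Spec_calculate_uptime; infer_instance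

-- ===== CLAIM (what is proved, stated in full; the proofs are below) =====
def Claim_equal_calculate_uptime : Prop := ∀ (station_map : List (String × List String)) (charger_reports : List (String × List (Int × Int × Bool))), Dom_calculate_uptime station_map charger_reports → Spec_calculate_uptime station_map charger_reports (calculate_uptime station_map charger_reports)

-- ===== LEMMAS AND PROOFS =====

-- up-time contribution of a single merged group
def pvUp (t : Int × Int × Bool) : Int := if t.2.2 then t.2.1 - t.1 else 0

-- running max of interval ends, with base b
def pvE (b : Int) (m : List (Int × Int × Bool)) : Int := m.foldl (fun a y => max a y.2.1) b

-- the integer-interval bound Dom_calculate_uptime puts on every reported (start, end)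
def pvBnd (t : Int × Int × Bool) : Prop :=
  -2147483648 ≤ t.1 ∧ t.1 ≤ 2147483648 ∧ -2147483648 ≤ t.2.1 ∧ t.2.1 ≤ 2147483648

lemma pvAbsorb_shift (u : Bool) (a : Int) :
    ∀ (M : List (Int × Int × Bool)) (e0 : Int),
      pvAbsorb (max a e0) u M
        = pvAbsorb (max a (pvAbsorb e0 u M).1) u (pvAbsorb e0 u M).2 := by
  intro M
  induction M with
  | nil => intro e0; simp [pvAbsorb]
  | cons g R ih =>
    intro e0
    by_cases h : g.1 ≤ e0 ∧ g.2.2 == u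
    · have h' : g.1 ≤ max a e0 ∧ g.2.2 == u := ⟨le_trans h.1 (le_max_right a e0), h.2⟩
      have e1 : pvAbsorb e0 u (g :: R) = pvAbsorb (max e0 g.2.1) u R := by
        simp [pvAbsorb, h]
      have e2 : pvAbsorb (max a e0) u (g :: R) = pvAbsorb (max (max a e0) g.2.1) u R := by
        simp [pvAbsorb, h']
      rw [e1, e2, max_assoc]
      exact ih (max e0 g.2.1)
    · have e1 : pvAbsorb e0 u (g :: R) = (e0, g :: R) := by simp [pvAbsorb]; intro h1 h2; exact absurd ⟨h1, beq_iff_eq.mpr h2⟩ h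
      rw [e1]

lemma pvStep_eq_combine (L : List (Int × Int × Bool)) (y : Int × Int × Bool) :
    pvMergeStep L y = pvCombine L [y] := by
  unfold pvMergeStep pvCombine
  cases hl : L.getLast? with
  | none => rfl
  | some l =>
    have hL := List.dropLast_append_getLast? l hl
    by_cases h1 : y.1 ≤ l.2.1
    · by_cases h2 : y.2.2 == l.2.2
      · simp [pvAbsorb, h1, h2]
      · simp [pvAbsorb, h1, h2]
        rw [← hL]; simp
    · simp [pvAbsorb, h1]
      rw [← hL]; simp

lemma pvCombine_nil_right (L : List (Int × Int × Bool)) : pvCombine L [] = L := by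
  unfold pvCombine
  cases hl : L.getLast? with
  | none => exact (List.getLast?_eq_none_iff.mp hl).symm
  | some l =>
    have hL := List.dropLast_append_getLast? l hl
    simp only [pvAbsorb]
    rw [← hL]; simp

lemma pvCombine_assoc1 (L M : List (Int × Int × Bool)) (y : Int × Int × Bool) :
    pvCombine (pvCombine L [y]) M = pvCombine L (pvCombine [y] M) := by
  cases hl : L.getLast? with
  | none =>
    have hLnil : L = [] := List.getLast?_eq_none_iff.mp hl
    subst hLnil
    rfl
  | some l =>
    have hL := List.dropLast_append_getLast? l hl
    have hyM : pvCombine [y] M = (y.1, (pvAbsorb y.2.1 y.2.2 M).1, y.2.2) :: (pvAbsorb y.2.1 y.2.2 M).2 := by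
      simp [pvCombine]
    by_cases hc : y.1 ≤ l.2.1 ∧ y.2.2 == l.2.2
    · have hu : l.2.2 = y.2.2 := (eq_of_beq hc.2).symm
      -- LHS
      have hLy : pvCombine L [y] = L.dropLast ++ [(l.1, max l.2.1 y.2.1, l.2.2)] := by
        simp [pvCombine, hl, pvAbsorb, hc.1, hc.2]
      rw [hLy, hyM]
      have hgl : (L.dropLast ++ [(l.1, max l.2.1 y.2.1, l.2.2)]).getLast? = some (l.1, max l.2.1 y.2.1, l.2.2) :=
        List.getLast?_concat
      -- compute both sides
      unfold pvCombine
      rw [hgl, hl]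
      simp only [List.dropLast_concat]
      have habs : pvAbsorb l.2.1 l.2.2 ((y.1, (pvAbsorb y.2.1 y.2.2 M).1, y.2.2) :: (pvAbsorb y.2.1 y.2.2 M).2)
          = pvAbsorb (max l.2.1 (pvAbsorb y.2.1 y.2.2 M).1) l.2.2 (pvAbsorb y.2.1 y.2.2 M).2 := by
        simp [pvAbsorb, hc.1, hu]
      rw [habs, hu]
      rw [← pvAbsorb_shift]
    · have hLy : pvCombine L [y] = L ++ [y] := by
        rw [← pvStep_eq_combine]
        unfold pvMergeStep
        rw [hl]
        by_cases h1 : y.1 ≤ l.2.1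
        · have h2 : ¬ (y.2.2 == l.2.2) := fun hh => hc ⟨h1, hh⟩
          simp [h1, h2]
        · simp [h1]
      rw [hLy, hyM]
      unfold pvCombine
      rw [List.getLast?_concat, hl]
      simp only [List.dropLast_concat]
      have habs : pvAbsorb l.2.1 l.2.2 ((y.1, (pvAbsorb y.2.1 y.2.2 M).1, y.2.2) :: (pvAbsorb y.2.1 y.2.2 M).2)
          = (l.2.1, (y.1, (pvAbsorb y.2.1 y.2.2 M).1, y.2.2) :: (pvAbsorb y.2.1 y.2.2 M).2) := by
        simp [pvAbsorb]
        intro h1 h2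
        exact absurd ⟨h1, beq_iff_eq.mpr h2⟩ hc
      rw [habs]
      rw [← hL]
      simp

lemma pvFoldl_eq_combine :
    ∀ (ys L : List (Int × Int × Bool)),
      ys.foldl pvMergeStep L = pvCombine L (ys.foldl pvMergeStep []) := by
  intro ys
  induction ys with
  | nil => intro L; exact (pvCombine_nil_right L).symm
  | cons y ys ih =>
    intro L
    have h0 : pvMergeStep [] y = [y] := rfl
    calc (y :: ys).foldl pvMergeStep L
        = ys.foldl pvMergeStep (pvMergeStep L y) := rfl
      _ = pvCombine (pvMergeStep L y) (ys.foldl pvMergeStep []) := ih _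
      _ = pvCombine (pvCombine L [y]) (ys.foldl pvMergeStep []) := by rw [pvStep_eq_combine]
      _ = pvCombine L (pvCombine [y] (ys.foldl pvMergeStep [])) := pvCombine_assoc1 _ _ _
      _ = pvCombine L ((y :: ys).foldl pvMergeStep []) := by
            rw [List.foldl_cons, h0, ih [y]]

lemma pvDC_eq (ts : List (Int × Int × Bool)) : pvDC ts = ts.foldl pvMergeStep [] := by
  induction ts using pvDC.induct with
  | case1 => simp [pvDC]
  | case2 t => simp [pvDC, pvMergeStep]
  | case3 t1 t2 rest ih1 ih2 =>
    rw [pvDC, ih1, ih2, ← pvFoldl_eq_combine, ← List.foldl_append, List.take_append_drop]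

lemma pvUpfold' (m : List (Int × Int × Bool)) :
    ∀ c : Int, m.foldl (fun a t => if t.2.2 then a + (t.2.1 - t.1) else a) c
      = c + ((m.filter (fun g => g.2.2)).map (fun g => g.2.1 - g.1)).sum := by
  induction m with
  | nil => intro c; simp
  | cons t m ih =>
    intro c
    by_cases h : t.2.2 <;> simp [h, ih, add_assoc]

lemma pvMergeStep_starts {c : Int} {M : List (Int × Int × Bool)} {t : Int × Int × Bool}
    (hM : ∀ g ∈ M, c ≤ g.1) (ht : c ≤ t.1) : ∀ g ∈ pvMergeStep M t, c ≤ g.1 := by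
  intro g hg
  unfold pvMergeStep at hg
  cases hl : M.getLast? with
  | none =>
    rw [hl] at hg
    have : g = t := by simpa using hg
    exact this ▸ ht
  | some l =>
    rw [hl] at hg
    have hlM : l ∈ M := List.mem_of_getLast? hl
    dsimp only at hg
    split_ifs at hg
    · rcases List.mem_append.mp hg with h | h
      · exact hM g (List.mem_of_mem_dropLast h)
      · have : g = (l.1, max l.2.1 t.2.1, l.2.2) := by simpa using h
        rw [this]
        exact hM l hlM
    · rcases List.mem_append.mp hg with h | h
      · exact hM g h
      · have : g = t := by simpa using h
        exact this ▸ ht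
    · rcases List.mem_append.mp hg with h | h
      · exact hM g h
      · have : g = t := by simpa using h
        exact this ▸ ht

lemma pvMerge_starts (c : Int) :
    ∀ (ts M : List (Int × Int × Bool)), (∀ g ∈ M, c ≤ g.1) → (∀ t ∈ ts, c ≤ t.1) →
      ∀ g ∈ ts.foldl pvMergeStep M, c ≤ g.1 := by
  intro ts
  induction ts with
  | nil => intro M hM _ g hg; exact hM g hg
  | cons t ts ih =>
    intro M hM hts g hg
    rw [List.foldl_cons] at hg
    exact ih (pvMergeStep M t) (pvMergeStep_starts hM (hts t (by simp)))
      (fun y hy => hts y (List.mem_cons_of_mem _ hy)) g hg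

lemma pvMergeStep_head (d : Int × Int × Bool) {M : List (Int × Int × Bool)}
    (hM : M ≠ []) (t : Int × Int × Bool) :
    pvMergeStep M t ≠ [] ∧ ((pvMergeStep M t).headD d).1 = (M.headD d).1 := by
  obtain ⟨m, M', rfl⟩ := List.exists_cons_of_ne_nil hM
  unfold pvMergeStep
  cases hl : (m :: M').getLast? with
  | none => simp at hl
  | some l =>
    dsimp only
    split_ifs
    · cases M' with
      | nil =>
        have : m = l := by simpa using hl
        subst this
        simp
      | cons m2 M'' => simp
    · cases M' <;> simp
    · cases M' <;> simp

lemma pvMerge_head (d : Int × Int × Bool) :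
    ∀ (ts M : List (Int × Int × Bool)), M ≠ [] →
      ts.foldl pvMergeStep M ≠ [] ∧
      ((ts.foldl pvMergeStep M).headD d).1 = (M.headD d).1 := by
  intro ts
  induction ts with
  | nil => intro M hM; exact ⟨hM, rfl⟩
  | cons t ts ih =>
    intro M hM
    have hs := pvMergeStep_head d hM t
    have := ih (pvMergeStep M t) hs.1
    exact ⟨this.1, by rw [List.foldl_cons, this.2, hs.2]⟩

lemma pvE_cons (b : Int) (x : Int × Int × Bool) (m : List (Int × Int × Bool)) :
    pvE b (x :: m) = pvE (max b x.2.1) m := rfl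

lemma le_pvE_base (b : Int) (m : List (Int × Int × Bool)) : b ≤ pvE b m := by
  induction m generalizing b with
  | nil => simp [pvE]
  | cons x m ih => rw [pvE_cons]; exact le_trans (le_max_left b x.2.1) (ih (max b x.2.1))

lemma le_pvE_mem (b : Int) (m : List (Int × Int × Bool)) (y : Int × Int × Bool) :
    y ∈ m → y.2.1 ≤ pvE b m := by
  induction m generalizing b with
  | nil => intro h; cases h
  | cons x m ih =>
    intro h
    rw [pvE_cons]
    rcases List.mem_cons.mp h with h | h
    · subst h; exact le_trans (le_max_right b y.2.1) (le_pvE_base _ m)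
    · exact ih _ h

lemma pvE_le {b c : Int} {m : List (Int × Int × Bool)} (hb : b ≤ c)
    (hm : ∀ y ∈ m, y.2.1 ≤ c) : pvE b m ≤ c := by
  induction m generalizing b with
  | nil => exact hb
  | cons x m ih =>
    rw [pvE_cons]
    exact ih (max_le hb (hm x (by simp))) (fun y hy => hm y (by simp [hy]))

lemma pvKey_le_start {x y : Int × Int × Bool} (hx : pvBnd x) (hy : pvBnd y)
    (h : pvKey x ≤ pvKey y) : x.1 ≤ y.1 := by
  obtain ⟨hx1, hx2, hx3, hx4⟩ := hx
  obtain ⟨hy1, hy2, hy3, hy4⟩ := hy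
  unfold pvKey at h
  split_ifs at h <;> omega

lemma pvLookup_mem {α : Type} {l : List (String × α)} {k : String} {v : α}
    (h : l.lookup k = some v) : (k, v) ∈ l := by
  induction l with
  | nil => simp [List.lookup] at h
  | cons p l ih =>
    rw [List.lookup_cons] at h
    cases hk : (k == p.1) with
    | true =>
      rw [hk] at h
      have hk' : k = p.1 := by simpa using hk
      have hv : p.2 = v := by simpa using h
      exact List.mem_cons.mpr (Or.inl (by rw [hk', ← hv]))
    | false =>
      rw [hk] at h
      exact List.mem_cons_of_mem _ (ih h)

lemma pvStation_eq (cr : List (String × List (Int × Int × Bool)))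
    (hb : ∀ p ∈ cr, ∀ t ∈ p.2, pvBnd t) (chargers : List String) :
    pvStationA cr chargers = pvStationB cr chargers := by
  have hfun : (fun (acc : List (Int × Int × Bool)) (cid : String) =>
      match cr.lookup cid with
      | none => acc
      | some rs => rs.foldl (fun acc2 t => acc2 ++ [t]) acc)
      = fun acc cid => acc ++ ((cr.lookup cid).getD []) := by
    funext acc cid
    cases h : cr.lookup cid with
    | none => simp
    | some rs => simpa using PySem.List.foldl_append_singleton rs acc
  have hcollect : chargers.foldl (fun acc cid => acc ++ ((cr.lookup cid).getD [])) []
      = chargers.flatMap (fun c => (cr.lookup c).getD []) := by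
    simpa using PySem.List.foldl_append_eq_flatMap (fun c => (cr.lookup c).getD []) chargers
  have hmemI : ∀ y ∈ chargers.flatMap (fun c => (cr.lookup c).getD []), pvBnd y := by
    intro y hy
    rcases List.mem_flatMap.mp hy with ⟨c, hcm, hyc⟩
    cases h : cr.lookup c with
    | none => rw [h] at hyc; simp at hyc
    | some rs => rw [h] at hyc; exact hb (c, rs) (pvLookup_mem h) y (by simpa using hyc)
  simp only [pvStationA, pvStationB, hfun, hcollect, pvDC_eq]
  cases hI : PySem.List.sorted (chargers.flatMap fun c => (cr.lookup c).getD []) pvKey with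
  | nil => rfl
  | cons h0 tl =>
    have hbI : ∀ y ∈ h0 :: tl, pvBnd y := by
      intro y hy
      rw [← hI] at hy
      exact hmemI y ((PySem.List.mem_sorted _ _ _ _).mp hy)
    have hc0 : ∀ y ∈ h0 :: tl, h0.1 ≤ y.1 := by
      intro y hy
      have hyI : y ∈ chargers.flatMap (fun c => (cr.lookup c).getD []) := by
        rw [← hI] at hy
        exact (PySem.List.mem_sorted _ _ _ _).mp hy
      exact pvKey_le_start (hbI h0 (by simp)) (hbI y hy)
        (PySem.List.key_head_sorted_le _ pvKey hI y hyI)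
    have hfold1 : (h0 :: tl).foldl pvMergeStep [] = tl.foldl pvMergeStep [h0] := rfl
    have hhd := pvMerge_head ((0 : Int), (0 : Int), false) tl [h0] (by simp)
    cases hm : (h0 :: tl).foldl pvMergeStep [] with
    | nil => rw [hfold1] at hm; exact absurd hm hhd.1
    | cons g0 gs =>
      rw [hfold1] at hm
      have hg0 : g0.1 = h0.1 := by
        have := hhd.2
        rw [hm] at this
        simpa using this
      have hstarts : ∀ g ∈ g0 :: gs, h0.1 ≤ g.1 := by
        rw [← hm]
        refine pvMerge_starts h0.1 tl [h0] ?_ ?_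
        · intro g hg; simp at hg; rw [hg]
        · exact fun y hy => hc0 y (List.mem_cons_of_mem _ hy)
      cases hz : PySem.List.max? (g0 :: gs) (fun x => x.2.1) with
      | none => rw [PySem.List.max?_eq_none_iff] at hz; simp at hz
      | some z =>
        cases hw : PySem.List.min? (g0 :: gs) (fun x => x.1) with
        | none => rw [PySem.List.min?_eq_none_iff] at hw; simp at hw
        | some w =>
          have hzval : z.2.1 = pvE g0.2.1 gs := by
            refine le_antisymm ?_ ?_
            · rcases List.mem_cons.mp (PySem.List.max?_mem hz) with h | h
              · rw [h]; exact le_pvE_base _ _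
              · exact le_pvE_mem _ _ _ h
            · exact pvE_le (PySem.List.max?_isMax hz g0 (by simp))
                (fun y hy => PySem.List.max?_isMax hz y (List.mem_cons_of_mem _ hy))
          have hwval : w.1 = g0.1 := by
            refine le_antisymm (PySem.List.min?_isMin hw g0 (by simp)) ?_
            rw [hg0]
            exact hstarts w (PySem.List.min?_mem hw)
          have hup : (g0 :: gs).foldl (fun a t => if t.2.2 then a + (t.2.1 - t.1) else a) (0 : Int)
              = (((g0 :: gs).filter (fun g => g.2.2)).map (fun g => g.2.1 - g.1)).sum := by
            simpa using pvUpfold' (g0 :: gs) 0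
          have hE : gs.foldl (fun a g => max a g.2.1) g0.2.1 = pvE g0.2.1 gs := rfl
          simp only [List.isEmpty_cons, Bool.false_eq_true, if_false, Option.getD_some, hzval, hwval,
            hup, hE]
          by_cases ht : pvE g0.2.1 gs - g0.1 = 0 <;> simp [ht]

-- ===== VERDICT (by name: the statement is the Claim_ definition above) =====
theorem calculate_uptime_spec : Claim_equal_calculate_uptime := by
  intro sm cr hdom
  have hb : ∀ p ∈ cr, ∀ t ∈ p.2, pvBnd t := by
    intro p hp t ht
    unfold Dom_calculate_uptime at hdom
    simp only [Bool.and_eq_true, List.all_eq_true] at hdom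
    have := (hdom.2 p hp).2 t ht
    simp only [pvDomInt, decide_eq_true_eq] at this
    exact ⟨this.1.1, this.1.2, this.2.1, this.2.2⟩
  show _ = _
  unfold calculate_uptime calculate_uptime_alt
  have hfold : ∀ (l : List (String × List String)) (dd : PySem.Dict String Int),
      l.foldl (fun d p => d.insert p.1 (pvStationA cr p.2)) dd
        = l.foldl (fun d p => d.insert p.1 (pvStationB cr p.2)) dd := by
    intro l
    induction l with
    | nil => intro dd; rfl
    | cons p l ih => intro dd; simp only [List.foldl_cons, pvStation_eq cr hb p.2, ih]
  rw [hfold]
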